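-- pv_equiv track=rewrite | github.com/will-hill/AI_Decomposed | Python/AI_Decomposed.py | calc_ttl_pixels
-- ===== SOURCE A (Python) =====
-- def calc_ttl_pixels(width, height, recursions):
--     w = width
--     h = height
--     total_pixels = 0
--     for i in range(1,(recursions+1),1):
--         total_pixels = total_pixels + (w*h)
--         w = w - 1
--         h = h - 1
--     return total_pixels
-- ===== SOURCE B (Python) =====
-- def calc_ttl_pixels(width, height, recursions):
--     r = recursions if recursions > 0 else 0
--     s1 = r * (r - 1) // 2
--     s2 = (r - 1) * r * (2 * r - 1) // 6
--     return r * width * height - (width + height) * s1 + s2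
-- ===== Notes on version B (the rewrite author's own statement) =====
-- stated objective: faster
-- what changed: Replaced the O(recursions) loop summing (width-k)*(height-k) by an O(1) closed form using the sum-of-k and sum-of-squares identities.
import Mathlib
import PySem

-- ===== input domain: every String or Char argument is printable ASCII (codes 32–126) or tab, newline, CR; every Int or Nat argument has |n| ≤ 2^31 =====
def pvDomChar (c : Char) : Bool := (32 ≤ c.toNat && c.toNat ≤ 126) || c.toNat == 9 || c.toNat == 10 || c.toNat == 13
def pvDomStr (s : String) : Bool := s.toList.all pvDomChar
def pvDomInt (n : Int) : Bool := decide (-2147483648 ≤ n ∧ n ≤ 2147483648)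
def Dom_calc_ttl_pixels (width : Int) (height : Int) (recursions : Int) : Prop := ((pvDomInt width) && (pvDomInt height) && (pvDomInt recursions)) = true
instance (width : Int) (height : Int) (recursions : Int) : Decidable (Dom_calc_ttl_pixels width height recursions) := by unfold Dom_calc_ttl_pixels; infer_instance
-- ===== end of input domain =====

-- B replaces A's O(recursions) accumulation loop by an O(1) closed form via sum-of-k / sum-of-squares identities.


-- ===== PORT A =====
-- loop state (w, h, total_pixels); each range iteration adds w*h then decrements w and h
def calc_ttl_pixels (width : Int) (height : Int) (recursions : Int) : Int :=
  ((PySem.List.pyRange 1 (recursions + 1) 1).foldl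
      (fun (st : Int × Int × Int) _ => (st.1 - 1, st.2.1 - 1, st.2.2 + st.1 * st.2.1))
      (width, height, 0)).2.2

-- ===== PORT B =====
def calc_ttl_pixels_alt (width : Int) (height : Int) (recursions : Int) : Int :=
  let r : Int := if recursions > 0 then recursions else 0
  let s1 : Int := PySem.Int.floordiv (r * (r - 1)) 2
  let s2 : Int := PySem.Int.floordiv ((r - 1) * r * (2 * r - 1)) 6
  r * width * height - (width + height) * s1 + s2

-- ===== PRECONDITION & SPEC =====
def Spec_calc_ttl_pixels (width : Int) (height : Int) (recursions : Int) (out : Int) : Prop := out = calc_ttl_pixels_alt width height recursions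
instance (width : Int) (height : Int) (recursions : Int) (out : Int) : Decidable (Spec_calc_ttl_pixels width height recursions out) := by unfold Spec_calc_ttl_pixels; infer_instance

-- ===== CLAIM (what is proved, stated in full; the proofs are below) =====
def Claim_equal_calc_ttl_pixels : Prop := ∀ (width : Int) (height : Int) (recursions : Int), Dom_calc_ttl_pixels width height recursions → Spec_calc_ttl_pixels width height recursions (calc_ttl_pixels width height recursions)

-- ===== LEMMAS AND PROOFS =====

-- a fold that ignores the list elements is an iterate of its step
theorem pvFoldlConst {α β : Type} (g : α → α) (l : List β) (init : α) :
    l.foldl (fun st _ => g st) init = g^[l.length] init := by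
  induction l generalizing init with
  | nil => rfl
  | cons x xs ih => simp [List.foldl_cons, ih, Function.iterate_succ_apply]

-- closed description of A's loop state after n iterations
theorem pvIterStep (n : Nat) (w h t : Int) :
    (fun (st : Int × Int × Int) => (st.1 - 1, st.2.1 - 1, st.2.2 + st.1 * st.2.1))^[n] (w, h, t)
      = (w - n, h - n, t + ∑ k ∈ Finset.range n, (w - k) * (h - k)) := by
  induction n with
  | zero => simp
  | succ m ih =>
      rw [Function.iterate_succ_apply', ih]
      simp only [Finset.sum_range_succ]
      refine Prod.ext (by push_cast; ring) (Prod.ext (by push_cast; ring) ?_)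
      push_cast; ring

theorem pvSumK (n : Nat) : 2 * ∑ k ∈ Finset.range n, (k : Int) = (n : Int) * ((n : Int) - 1) := by
  induction n with
  | zero => simp
  | succ m ih => rw [Finset.sum_range_succ]; push_cast; push_cast at ih; linarith

theorem pvSumK2 (n : Nat) :
    6 * ∑ k ∈ Finset.range n, (k : Int) * k = ((n : Int) - 1) * n * (2 * n - 1) := by
  induction n with
  | zero => simp
  | succ m ih => rw [Finset.sum_range_succ]; push_cast; push_cast at ih; nlinarith [ih]

theorem pvFd2 (q : Int) : PySem.Int.floordiv (2 * q) 2 = q := by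
  rw [PySem.Int.floordiv_eq_ediv_of_pos (by norm_num)]
  exact Int.mul_ediv_cancel_left q (by norm_num)

theorem pvFd6 (q : Int) : PySem.Int.floordiv (6 * q) 6 = q := by
  rw [PySem.Int.floordiv_eq_ediv_of_pos (by norm_num)]
  exact Int.mul_ediv_cancel_left q (by norm_num)

-- ===== VERDICT (by name: the statement is the Claim_ definition above) =====
theorem calc_ttl_pixels_spec : Claim_equal_calc_ttl_pixels := by
  intro w h r _
  unfold Spec_calc_ttl_pixels calc_ttl_pixels calc_ttl_pixels_alt
  by_cases hr : r > 0
  · simp only [if_pos hr]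
    set n : Nat := r.toNat with hn
    have hrn : (n : Int) = r := Int.toNat_of_nonneg (le_of_lt hr)
    have hlen : (PySem.List.pyRange 1 (r + 1) 1).length = n := by
      rw [PySem.List.length_pyRange_one]; omega
    rw [pvFoldlConst, hlen, pvIterStep]
    have h1 : r * (r - 1) = 2 * ∑ k ∈ Finset.range n, (k : Int) := by
      rw [pvSumK, hrn]
    have h2 : (r - 1) * r * (2 * r - 1) = 6 * ∑ k ∈ Finset.range n, (k : Int) * k := by
      rw [pvSumK2, hrn]
    rw [h1, h2, pvFd2, pvFd6]
    have hexp : ∀ k ∈ Finset.range n, (w - (k : Int)) * (h - k)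
        = w * h - (w + h) * k + k * k := by intro k _; ring
    rw [Finset.sum_congr rfl hexp, Finset.sum_add_distrib, Finset.sum_sub_distrib,
      Finset.sum_const, ← Finset.mul_sum]
    simp [hrn]; ring
  · simp only [if_neg hr]
    rw [PySem.List.pyRange_one_eq_nil (by omega)]
    simp [PySem.Int.floordiv]
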